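-- pv_equiv track=rewrite | github.com/pypi-data/pypi-mirror-367 | packages/a3/a3-0.4.4.tar.gz/a3-0.4.4/a3/engines/code_generator.py | _parse_file_content
-- ===== SOURCE A (Python) =====
-- def _parse_file_content(content: str) -> tuple:
--     """Parse file content into imports and functions sections."""
--     lines = content.split('\n')
--     imports_section = []
--     functions_section = []
--
--     in_imports = True
--     for line in lines:
--         stripped = line.strip()
--         if in_imports and (stripped.startswith('import ') or stripped.startswith('from ') or stripped == '' or stripped.startswith('#')):
--             imports_section.append(line)
--         else:
--             in_imports = False
--             functions_section.append(line)
--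
--     return '\n'.join(imports_section), '\n'.join(functions_section)
-- ===== SOURCE B (Python) =====
-- def _parse_file_content(content: str) -> tuple:
--     """Parse file content into imports and functions sections."""
--     lines = content.split('\n')
--
--     def _is_import_like(line):
--         s = line.strip()
--         return s == '' or s.startswith('#') or s.startswith('import ') or s.startswith('from ')
--
--     split = next((i for i, l in enumerate(lines) if not _is_import_like(l)), len(lines))
--     return '\n'.join(lines[:split]), '\n'.join(lines[split:])
-- ===== Notes on version B (the rewrite author's own statement) =====
-- stated objective: alternative
-- what changed: B computes the index of the first non-import-like line and partitions by slicing, instead of A's latched single loop that appends each line to one of two accumulator lists.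
import Mathlib
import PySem

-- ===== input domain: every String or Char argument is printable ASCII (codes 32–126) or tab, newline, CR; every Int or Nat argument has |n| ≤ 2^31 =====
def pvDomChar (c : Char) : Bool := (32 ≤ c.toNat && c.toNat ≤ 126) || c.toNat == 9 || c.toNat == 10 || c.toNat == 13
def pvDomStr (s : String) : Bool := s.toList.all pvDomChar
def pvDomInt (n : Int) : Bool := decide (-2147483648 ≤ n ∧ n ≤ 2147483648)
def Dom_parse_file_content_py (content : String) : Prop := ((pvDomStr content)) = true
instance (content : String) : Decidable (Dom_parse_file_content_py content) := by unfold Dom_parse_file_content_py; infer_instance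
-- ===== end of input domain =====

-- B replaces A's latched two-accumulator loop by finding the first non-import-like line index and slicing; same O(n) cost, different decomposition.

-- ===== PORT A =====
-- A's inline import-line test, in A's disjunct order
def aIsImp (line : String) : Bool :=
  let s := PySem.Str.strip line
  PySem.Str.startswith s "import " || PySem.Str.startswith s "from " || (s == "") || PySem.Str.startswith s "#"

-- one loop iteration of A: state = (imports_section, functions_section, in_imports)
def aStep (st : List String × List String × Bool) (line : String) : List String × List String × Bool :=
  if st.2.2 && aIsImp line then (st.1 ++ [line], st.2.1, st.2.2)
  else (st.1, st.2.1 ++ [line], false)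

def parse_file_content_py (content : String) : String × String :=
  let lines := (PySem.Str.split? content "\n").getD []
  let st := lines.foldl aStep ([], [], true)
  (PySem.Str.join "\n" st.1, PySem.Str.join "\n" st.2.1)

-- ===== PORT B =====
-- B's predicate, in B's disjunct order
def bIsImp (line : String) : Bool :=
  let s := PySem.Str.strip line
  (s == "") || PySem.Str.startswith s "#" || PySem.Str.startswith s "import " || PySem.Str.startswith s "from "

def parse_file_content_py_alt (content : String) : String × String :=
  let lines := (PySem.Str.split? content "\n").getD []
  let split := List.findIdx (fun l => !(bIsImp l)) lines
  (PySem.Str.join "\n" (lines.take split), PySem.Str.join "\n" (lines.drop split))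

-- ===== PRECONDITION & SPEC =====
def Spec_parse_file_content_py (content : String) (out : String × String) : Prop := out = parse_file_content_py_alt content
instance (content : String) (out : String × String) : Decidable (Spec_parse_file_content_py content out) := by unfold Spec_parse_file_content_py; infer_instance

-- ===== CLAIM (what is proved, stated in full; the proofs are below) =====
def Claim_equal_parse_file_content_py : Prop := ∀ (content : String), Dom_parse_file_content_py content → Spec_parse_file_content_py content (parse_file_content_py content)

-- ===== LEMMAS AND PROOFS =====

lemma bIsImp_eq_aIsImp (l : String) : bIsImp l = aIsImp l := by
  simp only [aIsImp, bIsImp]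
  generalize PySem.Str.strip l = s
  cases PySem.Str.startswith s "import " <;>
    cases PySem.Str.startswith s "from " <;>
      cases (s == "") <;>
        cases PySem.Str.startswith s "#" <;> rfl

-- once the latch is off, A just appends every remaining line to functions_section
lemma foldl_aStep_false (ls imps fns : List String) :
    ls.foldl aStep (imps, fns, false) = (imps, fns ++ ls, false) := by
  induction ls generalizing fns with
  | nil => simp
  | cons l ls ih =>
    simp only [List.foldl_cons, aStep]
    simpa using ih (fns ++ [l])

-- while the latch is on, A's loop computes the takeWhile/dropWhile split
lemma foldl_aStep_true (ls imps : List String) :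
    ls.foldl aStep (imps, [], true) =
      (imps ++ ls.takeWhile aIsImp, ls.dropWhile aIsImp, (ls.dropWhile aIsImp).isEmpty) := by
  induction ls generalizing imps with
  | nil => simp
  | cons l ls ih =>
    by_cases h : aIsImp l = true
    · simp only [List.foldl_cons, aStep, h, Bool.true_and,
        List.takeWhile_cons_of_pos h, List.dropWhile_cons_of_pos h]
      simpa using ih (imps ++ [l])
    · simp only [List.foldl_cons, aStep, Bool.true_and, h, if_neg, Bool.false_eq_true,
        not_false_iff, List.takeWhile_cons_of_neg h, List.dropWhile_cons_of_neg h]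
      simp [foldl_aStep_false]

-- the boundary index B computes cuts the list exactly at A's takeWhile/dropWhile split
lemma take_findIdx_eq_takeWhile (p : String → Bool) (ls : List String) :
    ls.take (List.findIdx (fun l => !(p l)) ls) = ls.takeWhile p := by
  induction ls with
  | nil => rfl
  | cons l ls ih =>
    by_cases h : p l = true
    · simp [List.findIdx_cons, h, List.takeWhile_cons_of_pos h, ih]
    · simp [List.findIdx_cons, h, List.takeWhile_cons_of_neg h]

lemma drop_findIdx_eq_dropWhile (p : String → Bool) (ls : List String) :
    ls.drop (List.findIdx (fun l => !(p l)) ls) = ls.dropWhile p := by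
  induction ls with
  | nil => rfl
  | cons l ls ih =>
    by_cases h : p l = true
    · simp [List.findIdx_cons, h, List.dropWhile_cons_of_pos h, ih]
    · simp [List.findIdx_cons, h, List.dropWhile_cons_of_neg h]

-- ===== VERDICT (by name: the statement is the Claim_ definition above) =====
theorem parse_file_content_py_spec : Claim_equal_parse_file_content_py := by
  intro content _
  unfold Spec_parse_file_content_py parse_file_content_py parse_file_content_py_alt
  have hp : (fun l => !(bIsImp l)) = (fun l => !(aIsImp l)) := by
    funext l; rw [bIsImp_eq_aIsImp]
  simp only [hp, foldl_aStep_true, take_findIdx_eq_takeWhile, drop_findIdx_eq_dropWhile]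
  simp
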